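-- pv_equiv track=rewrite | github.com/levibean95-hub/Obsidian7kdbInfo | sort_heroes_by_rarity.py | format_heroes_array
-- ===== SOURCE A (Python) =====
-- def format_heroes_array(sorted_heroes, hero_rarities):
--     """Format the heroes array with comments showing rarity tiers"""
--     lines = ['// Hero data - sorted by rarity (L++ to Unknown) then alphabetically\nconst heroes = [']
--
--     current_rarity = None
--     for hero in sorted_heroes:
--         rarity = hero_rarities.get(hero, 'Unknown')
--
--         # Add a comment line when rarity changes
--         if rarity != current_rarity:
--             # Don't add comma removal here - keep comma on last hero of previous tier
--             lines.append(f"    // {rarity} Tier")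
--             current_rarity = rarity
--
--         lines.append(f"    '{hero}',")
--
--     # Remove trailing comma from the last hero only
--     if lines[-1].endswith(','):
--         lines[-1] = lines[-1].rstrip(',')
--
--     lines.append('];')
--     return '\n'.join(lines)
-- ===== SOURCE B (Python) =====
-- def format_heroes_array(sorted_heroes, hero_rarities):
--     """Format the heroes array with comments showing rarity tiers"""
--     header = '// Hero data - sorted by rarity (L++ to Unknown) then alphabetically\nconst heroes = ['
--     # Build the body back-to-front: the last hero never gets a comma (so no
--     # strip pass is needed), and a tier comment goes before a hero exactly when
--     # it has no predecessor or its predecessor has a different rarity.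
--     rev = []
--     rest = list(sorted_heroes)
--     while rest:
--         hero = rest.pop()
--         rarity = hero_rarities.get(hero, 'Unknown')
--         rev.append("    '" + hero + ("'," if rev else "'"))
--         if not rest or hero_rarities.get(rest[-1], 'Unknown') != rarity:
--             rev.append(f"    // {rarity} Tier")
--     rev.reverse()
--     return '\n'.join([header] + rev + ['];'])
-- ===== Notes on version B (the rewrite author's own statement) =====
-- stated objective: alternative
-- what changed: B builds the body back-to-front by popping heroes off the end: the globally last hero line is emitted without a comma directly and a tier comment is placed by looking at the predecessor, so A's current_rarity running state and the final endswith/rstrip(',') trimming pass disappear; the reversed list is flipped once at the end.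
import Mathlib
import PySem

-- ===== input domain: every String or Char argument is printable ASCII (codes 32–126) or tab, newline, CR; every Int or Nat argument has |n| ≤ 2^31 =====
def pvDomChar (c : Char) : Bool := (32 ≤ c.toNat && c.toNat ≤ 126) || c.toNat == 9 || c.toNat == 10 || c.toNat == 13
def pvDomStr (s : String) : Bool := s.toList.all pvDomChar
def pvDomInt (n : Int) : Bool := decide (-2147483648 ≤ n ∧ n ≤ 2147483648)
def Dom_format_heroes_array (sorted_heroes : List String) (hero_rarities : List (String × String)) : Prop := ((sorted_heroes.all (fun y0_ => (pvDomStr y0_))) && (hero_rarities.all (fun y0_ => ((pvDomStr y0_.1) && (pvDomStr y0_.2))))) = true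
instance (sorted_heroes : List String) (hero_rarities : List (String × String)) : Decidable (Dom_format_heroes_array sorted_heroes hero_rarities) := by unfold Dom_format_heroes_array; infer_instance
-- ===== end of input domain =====

-- B builds the body back-to-front (pop from the end): the globally last hero
-- line is emitted comma-free directly and a tier comment is placed by looking
-- at the predecessor, so A's running current_rarity state and the final
-- rstrip(',') pass both disappear (alternative decomposition, same cost).

-- ===== PORT A =====

-- exact port of s.rstrip(','): remove all trailing ',' characters
def pvRstripComma (s : String) : String :=
  String.ofList ((s.toList.reverse.dropWhile (· == ',')).reverse)

-- one iteration of A's for-loop; state = (lines, current_rarity)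
def fhaStep (d : PySem.Dict String String) (st : List String × Option String) (hero : String) :
    List String × Option String :=
  let rarity := d.getD hero "Unknown"
  let st := if some rarity ≠ st.2 then (st.1 ++ ["    // " ++ rarity ++ " Tier"], some rarity) else st
  (st.1 ++ ["    '" ++ hero ++ "',"], st.2)

def format_heroes_array (sorted_heroes : List String) (hero_rarities : List (String × String)) : String :=
  let d := PySem.Dict.ofList hero_rarities
  let lines : List String := ["// Hero data - sorted by rarity (L++ to Unknown) then alphabetically\nconst heroes = ["]
  let st := sorted_heroes.foldl (fhaStep d) (lines, none)
  let lines := st.1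
  let lines :=
    if PySem.Str.endswith (PySem.List.pyGetD lines (-1) "") "," then
      lines.dropLast ++ [pvRstripComma (PySem.List.pyGetD lines (-1) "")]
    else lines
  PySem.Str.join "\n" (lines ++ ["];"])

-- ===== PORT B =====

-- the while-loop: rest.pop() from the end, building the reversed body in rev
def fhaRevLoop (d : PySem.Dict String String) (rest rev : List String) : List String :=
  if h : rest = [] then rev
  else
    let hero := rest.getLast!
    let rarity := d.getD hero "Unknown"
    let rest' := rest.dropLast
    let rev₁ := rev ++ ["    '" ++ hero ++ (if rev = [] then "'" else "',")]
    let rev₂ :=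
      if rest' = [] ∨ d.getD (rest'.getLast!) "Unknown" ≠ rarity then
        rev₁ ++ ["    // " ++ rarity ++ " Tier"]
      else rev₁
    fhaRevLoop d rest' rev₂
termination_by rest.length
decreasing_by
  cases rest with
  | nil => exact absurd rfl h
  | cons a l => simp [List.length_dropLast]

def format_heroes_array_alt (sorted_heroes : List String) (hero_rarities : List (String × String)) : String :=
  let header := "// Hero data - sorted by rarity (L++ to Unknown) then alphabetically\nconst heroes = ["
  let d := PySem.Dict.ofList hero_rarities
  let rev := fhaRevLoop d sorted_heroes []
  PySem.Str.join "\n" ([header] ++ rev.reverse ++ ["];"])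

-- ===== PRECONDITION & SPEC =====
def Spec_format_heroes_array (sorted_heroes : List String) (hero_rarities : List (String × String)) (out : String) : Prop := out = format_heroes_array_alt sorted_heroes hero_rarities
instance (sorted_heroes : List String) (hero_rarities : List (String × String)) (out : String) : Decidable (Spec_format_heroes_array sorted_heroes hero_rarities out) := by unfold Spec_format_heroes_array; infer_instance

-- ===== CLAIM (what is proved, stated in full; the proofs are below) =====
def Claim_equal_format_heroes_array : Prop := ∀ (sorted_heroes : List String) (hero_rarities : List (String × String)), Dom_format_heroes_array sorted_heroes hero_rarities → Spec_format_heroes_array sorted_heroes hero_rarities (format_heroes_array sorted_heroes hero_rarities)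

-- ===== LEMMAS AND PROOFS =====

-- what A's loop emits after the initial header, as a standalone recursion
def fhaEmit (d : PySem.Dict String String) : Option String → List String → List String
  | _, [] => []
  | cur, h :: t =>
    let r := d.getD h "Unknown"
    if some r ≠ cur then
      ("    // " ++ r ++ " Tier") :: ("    '" ++ h ++ "',") :: fhaEmit d (some r) t
    else ("    '" ++ h ++ "',") :: fhaEmit d cur t

lemma foldl_fhaStep_eq (d : PySem.Dict String String) :
    ∀ (xs : List String) (acc : List String) (cur : Option String),
      (xs.foldl (fhaStep d) (acc, cur)).1 = acc ++ fhaEmit d cur xs := by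
  intro xs
  induction xs with
  | nil => intro acc cur; simp [fhaEmit]
  | cons h t ih =>
    intro acc cur
    simp only [List.foldl_cons, fhaEmit]
    by_cases hc : some (d.getD h "Unknown") ≠ cur
    · have : fhaStep d (acc, cur) h =
        (acc ++ ["    // " ++ d.getD h "Unknown" ++ " Tier"] ++ ["    '" ++ h ++ "',"],
         some (d.getD h "Unknown")) := by
        simp [fhaStep, hc]
      rw [this, ih]
      simp [hc]
    · simp only [ne_eq, not_not] at hc
      have : fhaStep d (acc, cur) h =
          (acc ++ ["    '" ++ h ++ "',"], cur) := by
        simp [fhaStep, hc]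
      rw [this, ih]
      simp [hc]

-- the state fhaEmit carries after consuming ys, starting from cur
def fhaLK (d : PySem.Dict String String) (cur : Option String) (ys : List String) : Option String :=
  if ys = [] then cur else some (d.getD ys.getLast! "Unknown")

lemma fhaEmit_append (d : PySem.Dict String String) (x : String) :
    ∀ (ys : List String) (cur : Option String),
      fhaEmit d cur (ys ++ [x]) =
        fhaEmit d cur ys ++
          (if some (d.getD x "Unknown") ≠ fhaLK d cur ys then
             ["    // " ++ d.getD x "Unknown" ++ " Tier"] else []) ++
          ["    '" ++ x ++ "',"] := by
  intro ys
  induction ys with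
  | nil =>
    intro cur
    simp only [List.nil_append, fhaEmit, fhaLK]
    split_ifs with h1 <;> simp_all
  | cons h t ih =>
    intro cur
    have hlk : fhaLK d (some (d.getD h "Unknown")) t = fhaLK d cur (h :: t) := by
      unfold fhaLK
      cases t with
      | nil => simp
      | cons b u => simp [List.getLast?_cons_cons]
    simp only [List.cons_append, fhaEmit]
    by_cases hc : some (d.getD h "Unknown") ≠ cur
    · simp only [if_pos hc, ih, hlk]
      simp
    · simp only [if_neg hc, ih]
      simp only [ne_eq, not_not] at hc
      subst hc
      simp [hlk]

-- B's loop, rev-accumulator split off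
def fhaG (d : PySem.Dict String String) (rest : List String) (first : Bool) : List String :=
  if h : rest = [] then []
  else
    let hero := rest.getLast!
    let rarity := d.getD hero "Unknown"
    let rest' := rest.dropLast
    ("    '" ++ hero ++ (if first then "'" else "',")) ::
      ((if rest' = [] ∨ d.getD (rest'.getLast!) "Unknown" ≠ rarity then
          ["    // " ++ rarity ++ " Tier"] else []) ++ fhaG d rest' false)
termination_by rest.length
decreasing_by
  cases rest with
  | nil => exact absurd rfl h
  | cons a l => simp [List.length_dropLast]

lemma fhaRevLoop_eq_G (d : PySem.Dict String String) :
    ∀ (rest rev : List String), fhaRevLoop d rest rev = rev ++ fhaG d rest (rev = []) := by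
  intro rest rev
  induction rest, rev using fhaRevLoop.induct d with
  | case1 rev => rw [fhaRevLoop, fhaG]; simp
  | case2 rest rev h hero rarity rest' rev₁ rev₂ ih =>
    have hne : rev₂ ≠ [] := by
      simp only [rev₂, rev₁]
      split_ifs <;> simp
    simp only [rev₂, rev₁, rest', rarity, hero, decide_eq_false hne] at ih
    rw [fhaRevLoop, fhaG]
    simp only [dif_neg h, dite_eq_ite] at *
    rw [ih]
    split_ifs <;> simp_all

lemma fhaG_reverse_false (d : PySem.Dict String String) :
    ∀ (ys : List String), (fhaG d ys false).reverse = fhaEmit d none ys := by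
  intro ys
  induction ys using List.reverseRecOn with
  | nil => rw [fhaG]; simp [fhaEmit]
  | append_singleton ys x ih =>
    have hne : ys ++ [x] ≠ [] := by simp
    rw [fhaG, dif_neg hne, fhaEmit_append d x ys none]
    have h1 : (ys ++ [x]).getLast! = x := by simp
    have h2 : (ys ++ [x]).dropLast = ys := by simp
    rw [h1, h2]
    by_cases hys : ys = []
    · subst hys
      have h0 : fhaG d [] false = [] := by rw [fhaG]; simp
      simp [h0, fhaLK, fhaEmit]
    · have h3 : fhaLK d none ys = some (d.getD ys.getLast! "Unknown") := by
        simp [fhaLK, hys]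
      rw [h3]
      by_cases hk : d.getD ys.getLast! "Unknown" = d.getD x "Unknown" <;>
        simp [hys, hk, ih, ne_comm] <;> split_ifs <;> simp_all

-- the trimmed-last hero line
lemma rstrip_hero_line (x : String) :
    pvRstripComma ("    '" ++ x ++ "',") = "    '" ++ x ++ "'" := by
  unfold pvRstripComma
  have h1 : ("    '" ++ x ++ "',").toList = "    '".toList ++ x.toList ++ ['\'', ','] := by
    simp
  rw [h1]
  simp [List.dropWhile]
  apply String.toList_injective
  simp

lemma endswith_hero_line (x : String) :
    PySem.Str.endswith ("    '" ++ x ++ "',") "," = true := by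
  rw [PySem.Str.endswith_eq, PySem.Chars.endswith_iff]
  exact ⟨("    '" ++ x ++ "'").toList, by simp⟩

-- B's boundary test equals the state A's emit carries
lemma fhaBnd_iff (d : PySem.Dict String String) (ys : List String) (x : String) :
    (ys = [] ∨ d.getD ys.getLast! "Unknown" ≠ d.getD x "Unknown") ↔
      some (d.getD x "Unknown") ≠ fhaLK d none ys := by
  unfold fhaLK
  by_cases hys : ys = [] <;> simp [hys, ne_comm]

-- ===== VERDICT (by name: the statement is the Claim_ definition above) =====
theorem format_heroes_array_spec : Claim_equal_format_heroes_array := by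
  intro xs hr _
  unfold Spec_format_heroes_array format_heroes_array format_heroes_array_alt
  simp only [foldl_fhaStep_eq, fhaRevLoop_eq_G]
  rcases List.eq_nil_or_concat xs with rfl | ⟨ys, x, rfl⟩
  · have h0 : fhaG (PySem.Dict.ofList hr) [] true = [] := by rw [fhaG]; simp
    simp only [fhaEmit, decide_true, h0, List.append_nil, List.nil_append, List.reverse_nil]
    decide
  · simp only [List.concat_eq_append, List.nil_append, decide_true]
    set d := PySem.Dict.ofList hr with hd
    set header := "// Hero data - sorted by rarity (L++ to Unknown) then alphabetically\nconst heroes = [" with hh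
    set kx := d.getD x "Unknown" with hkx
    set bnd := if some kx = fhaLK d none ys then ([] : List String) else ["    // " ++ kx ++ " Tier"] with hbnd
    have hA : [header] ++ fhaEmit d none (ys ++ [x]) =
        (header :: (fhaEmit d none ys ++ bnd)) ++ ["    '" ++ x ++ "',"] := by
      rw [fhaEmit_append d x ys none]
      rw [hbnd]
      split_ifs with h1 h2 <;> simp_all
    rw [hA]
    rw [PySem.List.pyGetD_neg_one_append_singleton]
    rw [if_pos (endswith_hero_line x)]
    rw [List.dropLast_concat, rstrip_hero_line]
    -- B side
    have hne : ys ++ [x] ≠ [] := by simp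
    rw [fhaG, dif_neg hne]
    have h1 : (ys ++ [x]).getLast! = x := by simp
    have h2 : (ys ++ [x]).dropLast = ys := by simp
    rw [h1, h2]
    have hcond := fhaBnd_iff d ys x
    by_cases hb : some kx = fhaLK d none ys
    · simp only [hbnd, if_pos hb, List.append_nil]
      rw [if_neg (fun hc => (hcond.mp hc) hb)]
      simp [fhaG_reverse_false]
    · simp only [hbnd, if_neg hb]
      rw [if_pos (hcond.mpr hb)]
      simp [fhaG_reverse_false, hkx]
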